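-- pv_equiv track=rewrite | github.com/maryna-b/rag_chat_app | src/rag_pipeline.py | _extract_relevant_excerpt
-- ===== SOURCE A (Python) =====
-- def _extract_relevant_excerpt(content: str, question: str) -> str:
--     """Extract the most relevant excerpt from document content based on the question."""
--     # Split content into sentences
--     sentences = content.replace('\n', ' ').split('. ')
--
--     # Extract key terms from the question
--     question_words = set(question.lower().split())
--     stop_words = {'who', 'what', 'where', 'when', 'why', 'how', 'is', 'are', 'was', 'were',
--                  'the', 'a', 'an', 'and', 'or', 'but', 'in', 'on', 'at', 'to', 'for',
--                  'of', 'with', 'by', 'from', 'up', 'about', 'into', 'through', 'during',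
--                  'did', 'does', 'do', 'has', 'have', 'had', 'will', 'would', 'could', 'should'}
--     question_keywords = question_words - stop_words
--
--     # Score each sentence based on keyword overlap
--     sentence_scores = []
--     for i, sentence in enumerate(sentences):
--         sentence_words = set(sentence.lower().split())
--         # Count keyword matches
--         matches = len(question_keywords.intersection(sentence_words))
--         # Prefer sentences with multiple keywords
--         score = matches * matches if matches > 0 else 0
--         sentence_scores.append((score, i, sentence.strip()))
--
--     # Sort by score (highest first)
--     sentence_scores.sort(key=lambda x: x[0], reverse=True)
--
--     # Get the best sentences
--     relevant_sentences = []
--     for score, idx, sentence in sentence_scores[:3]:  # Top 3 sentences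
--         if score > 0 and sentence:  # Only include sentences with keyword matches
--             relevant_sentences.append(sentence)
--
--     if relevant_sentences:
--         # Join the most relevant sentences
--         excerpt = '. '.join(relevant_sentences)
--         if len(excerpt) > 300:
--             excerpt = excerpt[:300] + "..."
--         return excerpt
--     else:
--         # Fallback to beginning of content if no relevant sentences found
--         return content[:200] + "..." if len(content) > 200 else content
-- ===== SOURCE B (Python) =====
-- def _insert_top(pair, best):
--     """Insert (score, sentence) into the descending-ordered buffer `best`
--     (earlier sentences win ties, so strictly-greater moves ahead)."""
--     if not best:
--         return [pair]
--     if pair[0] > best[0][0]: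
--         return [pair] + best
--     return [best[0]] + _insert_top(pair, best[1:])
--
--
-- def _extract_relevant_excerpt(content: str, question: str) -> str:
--     """Extract the most relevant excerpt via a one-pass top-3 selection (no full sort)."""
--     sentences = content.replace('\n', ' ').split('. ')
--
--     stop_words = {'who', 'what', 'where', 'when', 'why', 'how', 'is', 'are', 'was', 'were',
--                  'the', 'a', 'an', 'and', 'or', 'but', 'in', 'on', 'at', 'to', 'for',
--                  'of', 'with', 'by', 'from', 'up', 'about', 'into', 'through', 'during',
--                  'did', 'does', 'do', 'has', 'have', 'had', 'will', 'would', 'could', 'should'}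
--     question_keywords = set(question.lower().split()) - stop_words
--
--     # One pass: keep only the three best (score, stripped sentence) pairs seen so far.
--     best = []
--     for sentence in sentences:
--         sentence_words = set(sentence.lower().split())
--         matches = len(question_keywords.intersection(sentence_words))
--         best = _insert_top((matches * matches, sentence.strip()), best)[:3]
--
--     relevant_sentences = [s for score, s in best if score > 0 and s]
--
--     if relevant_sentences:
--         excerpt = '. '.join(relevant_sentences)
--         if len(excerpt) > 300:
--             excerpt = excerpt[:300] + "..."
--         return excerpt
--     else:
--         return content[:200] + "..." if len(content) > 200 else content
-- ===== Notes on version B (the rewrite author's own statement) =====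
-- stated objective: alternative
-- what changed: B replaces A's build-full-score-list + stable reverse sort + [:3] slice by a single pass that maintains a bounded (at most 3 elements) descending insertion buffer of (score, stripped sentence) pairs, dropping the enumeration index entirely; the scoring and the final join/truncate/fallback are unchanged.
import Mathlib
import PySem

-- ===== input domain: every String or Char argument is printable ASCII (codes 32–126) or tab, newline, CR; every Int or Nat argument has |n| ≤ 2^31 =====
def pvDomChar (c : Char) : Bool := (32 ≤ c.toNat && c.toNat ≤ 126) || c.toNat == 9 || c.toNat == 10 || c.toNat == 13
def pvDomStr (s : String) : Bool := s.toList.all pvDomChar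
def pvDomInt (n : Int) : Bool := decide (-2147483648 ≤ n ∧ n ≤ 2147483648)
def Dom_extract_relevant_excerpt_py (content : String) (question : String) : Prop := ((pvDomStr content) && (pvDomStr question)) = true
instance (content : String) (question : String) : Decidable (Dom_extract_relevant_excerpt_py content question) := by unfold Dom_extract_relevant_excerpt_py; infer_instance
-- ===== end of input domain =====

-- B replaces A's full stable sort + [:3] slice by a one-pass bounded top-3 insertion buffer (alternative top-k selection, no full sort).


def pyStopWords : List String :=
  ["who", "what", "where", "when", "why", "how", "is", "are", "was", "were",
   "the", "a", "an", "and", "or", "but", "in", "on", "at", "to", "for",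
   "of", "with", "by", "from", "up", "about", "into", "through", "during",
   "did", "does", "do", "has", "have", "had", "will", "would", "could", "should"]

-- ===== PORT A =====
def extract_relevant_excerpt_py (content : String) (question : String) : String :=
  let sentences := (PySem.Str.split? (PySem.Str.replace content "\n" " ") ". ").getD []
  let question_words : PySem.Set String := PySem.Set.ofList (PySem.Str.split₀ (PySem.Str.lower question))
  let stop_words : PySem.Set String := PySem.Set.ofList pyStopWords
  let question_keywords := PySem.Set.diff question_words stop_words
  let sentence_scores : List (Nat × Int × String) :=
    (PySem.List.enumerate sentences 0).foldl (fun acc p =>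
      let sentence_words : PySem.Set String := PySem.Set.ofList (PySem.Str.split₀ (PySem.Str.lower p.2))
      let nmatches := (PySem.Set.inter question_keywords sentence_words).length
      let score : Nat := if nmatches > 0 then nmatches * nmatches else 0
      acc ++ [(score, p.1, PySem.Str.strip p.2)]) []
  let sorted_scores := PySem.List.sorted sentence_scores (fun x => x.1) true
  let relevant_sentences := (PySem.List.slice sorted_scores none (some 3)).foldl
      (fun acc t => if 0 < t.1 ∧ t.2.2 ≠ "" then acc ++ [t.2.2] else acc) []
  if relevant_sentences ≠ [] then
    let excerpt := PySem.Str.join ". " relevant_sentences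
    if PySem.Str.len excerpt > 300 then PySem.Str.slice excerpt none (some 300) ++ "..." else excerpt
  else
    if PySem.Str.len content > 200 then PySem.Str.slice content none (some 200) ++ "..." else content

-- ===== PORT B =====
def pyInsertTop (pair : Nat × String) (best : List (Nat × String)) : List (Nat × String) :=
  match best with
  | [] => [pair]
  | y :: ys => if y.1 < pair.1 then pair :: y :: ys else y :: pyInsertTop pair ys

def extract_relevant_excerpt_py_alt (content : String) (question : String) : String :=
  let sentences := (PySem.Str.split? (PySem.Str.replace content "\n" " ") ". ").getD []
  let question_keywords := PySem.Set.diff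
    (PySem.Set.ofList (PySem.Str.split₀ (PySem.Str.lower question))) (PySem.Set.ofList pyStopWords)
  let best : List (Nat × String) := sentences.foldl (fun best sentence =>
      let sentence_words : PySem.Set String := PySem.Set.ofList (PySem.Str.split₀ (PySem.Str.lower sentence))
      let nmatches := (PySem.Set.inter question_keywords sentence_words).length
      (pyInsertTop (nmatches * nmatches, PySem.Str.strip sentence) best).take 3) []
  let relevant_sentences := (best.filter (fun p => decide (0 < p.1) && decide (p.2 ≠ ""))).map (·.2)
  if relevant_sentences ≠ [] then
    let excerpt := PySem.Str.join ". " relevant_sentences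
    if PySem.Str.len excerpt > 300 then PySem.Str.slice excerpt none (some 300) ++ "..." else excerpt
  else
    if PySem.Str.len content > 200 then PySem.Str.slice content none (some 200) ++ "..." else content

-- ===== PRECONDITION & SPEC =====
def Spec_extract_relevant_excerpt_py (content : String) (question : String) (out : String) : Prop := out = extract_relevant_excerpt_py_alt content question
instance (content : String) (question : String) (out : String) : Decidable (Spec_extract_relevant_excerpt_py content question out) := by unfold Spec_extract_relevant_excerpt_py; infer_instance

-- ===== CLAIM (what is proved, stated in full; the proofs are below) =====
def Claim_equal_extract_relevant_excerpt_py : Prop := ∀ (content : String) (question : String), Dom_extract_relevant_excerpt_py content question → Spec_extract_relevant_excerpt_py content question (extract_relevant_excerpt_py content question)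

-- ===== LEMMAS AND PROOFS =====

-- projection dropping the enumeration index A carries and B does not
def pvProj (t : Nat × Int × String) : Nat × String := (t.1, t.2.2)

lemma pvInsertTop_eq_insertBy_map (x : Nat × Int × String) (acc : List (Nat × Int × String)) :
    pyInsertTop (x.1, x.2.2) (acc.map pvProj)
      = (PySem.List.insertBy (fun a b => decide (b.1 < a.1)) x acc).map pvProj := by
  induction acc with
  | nil => rfl
  | cons y ys ih =>
    simp only [List.map_cons, pyInsertTop, PySem.List.insertBy, pvProj]
    by_cases h : y.1 < x.1
    · simp [h, pvProj]
    · simp [h, pvProj, ih]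

lemma pvTake_insertBy {α : Type} (bef : α → α → Bool) (x : α) :
    ∀ (n : Nat) (ys : List α),
      (PySem.List.insertBy bef x ys).take n = (PySem.List.insertBy bef x (ys.take n)).take n := by
  intro n ys
  induction ys generalizing n with
  | nil => simp
  | cons y t ih =>
    cases n with
    | zero => simp
    | succ m =>
      simp only [List.take_succ_cons, PySem.List.insertBy]
      by_cases h : bef x y = true
      · have htt : (y :: t).take m = (y :: t.take m).take m := by
          simpa using (List.take_take (i := m) (j := m+1) (l := y :: t)).symm
        simp [h, htt]
      · simp [h, ih m]

lemma pvFoldl_insertBy_take {α : Type} (bef : α → α → Bool) :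
    ∀ (l : List α) (acc : List α),
      (l.foldl (fun a x => PySem.List.insertBy bef x a) acc).take 3
        = l.foldl (fun a x => (PySem.List.insertBy bef x a).take 3) (acc.take 3) := by
  intro l
  induction l with
  | nil => intro acc; rfl
  | cons x t ih =>
    intro acc
    simp only [List.foldl_cons]
    rw [ih, pvTake_insertBy]

lemma pvFold_enum_eq (sc : String → Nat) :
    ∀ (sentences : List String) (n : Int) (accA : List (Nat × Int × String)),
      sentences.foldl (fun best s => (pyInsertTop (sc s, PySem.Str.strip s) best).take 3) (accA.map pvProj)
        = ((PySem.List.enumerate sentences n).foldl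
            (fun acc p => (PySem.List.insertBy (fun a b => decide (b.1 < a.1))
              (sc p.2, p.1, PySem.Str.strip p.2) acc).take 3) accA).map pvProj := by
  intro sentences
  induction sentences with
  | nil => intro n accA; rfl
  | cons s t ih =>
    intro n accA
    have henum : PySem.List.enumerate (s :: t) n = (n, s) :: PySem.List.enumerate t (n + 1) := by
      simp [PySem.List.enumerate]
    rw [henum]
    simp only [List.foldl_cons]
    have hstep : (pyInsertTop (sc s, PySem.Str.strip s) (accA.map pvProj)).take 3
        = ((PySem.List.insertBy (fun a b => decide (b.1 < a.1)) (sc s, n, PySem.Str.strip s) accA).take 3).map pvProj := by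
      rw [List.map_take]
      congr 1
      exact pvInsertTop_eq_insertBy_map (sc s, n, PySem.Str.strip s) accA
    rw [hstep]
    exact ih (n + 1) _


lemma pvRelevant_eq (kw : PySem.Set String) (sents : List String) :
    List.foldl (fun acc t => if 0 < t.1 ∧ t.2.2 ≠ "" then acc ++ [t.2.2] else acc) []
      (PySem.List.slice
        (PySem.List.sorted
          (List.foldl (fun acc p =>
            acc ++ [((kw.inter (PySem.Set.ofList (PySem.Str.split₀ (PySem.Str.lower p.2)))).length *
                     (kw.inter (PySem.Set.ofList (PySem.Str.split₀ (PySem.Str.lower p.2)))).length,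
                     p.1, PySem.Str.strip p.2)]) [] (PySem.List.enumerate sents))
          (fun x => x.1) true) none (some 3))
    = (List.filter (fun p => decide (0 < p.1) && decide (p.2 ≠ ""))
        (sents.foldl (fun best sentence =>
          (pyInsertTop ((kw.inter (PySem.Set.ofList (PySem.Str.split₀ (PySem.Str.lower sentence)))).length *
                        (kw.inter (PySem.Set.ofList (PySem.Str.split₀ (PySem.Str.lower sentence)))).length,
                        PySem.Str.strip sentence) best).take 3) [])).map (·.2) := by
  rw [PySem.List.foldl_append_singleton_eq_map
        (f := fun p : Int × String =>
          ((kw.inter (PySem.Set.ofList (PySem.Str.split₀ (PySem.Str.lower p.2)))).length *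
           (kw.inter (PySem.Set.ofList (PySem.Str.split₀ (PySem.Str.lower p.2)))).length,
           p.1, PySem.Str.strip p.2))]
  simp only [List.nil_append]
  rw [PySem.List.sorted_rev_eq_foldl_insertBy]
  rw [PySem.List.slice_to _ (by norm_num : (0:Int) ≤ 3)]
  simp only [show ((3:Int)).toNat = 3 from rfl]
  rw [pvFoldl_insertBy_take]
  simp only [List.take_nil]
  rw [List.foldl_map]
  have hB := pvFold_enum_eq
      (sc := fun s => (kw.inter (PySem.Set.ofList (PySem.Str.split₀ (PySem.Str.lower s)))).length *
                      (kw.inter (PySem.Set.ofList (PySem.Str.split₀ (PySem.Str.lower s)))).length)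
      sents 0 []
  simp only [List.map_nil] at hB
  rw [hB]
  rw [PySem.List.foldl_append_ite (p := fun t : Nat × Int × String => 0 < t.1 ∧ t.2.2 ≠ "")
        (f := fun t : Nat × Int × String => t.2.2)]
  simp only [List.nil_append, List.filter_map, List.map_map]
  have hpred : ((fun p : Nat × String => decide (0 < p.1) && decide (p.2 ≠ "")) ∘ pvProj)
      = (fun x : Nat × Int × String => decide (0 < x.1 ∧ x.2.2 ≠ "")) := by
    funext t
    simp [pvProj]
    rfl
  rw [hpred]
  rfl

-- ===== VERDICT (by name: the statement is the Claim_ definition above) =====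
theorem extract_relevant_excerpt_py_spec : Claim_equal_extract_relevant_excerpt_py := by
  intro content question _
  unfold Spec_extract_relevant_excerpt_py extract_relevant_excerpt_py extract_relevant_excerpt_py_alt
  dsimp only
  have hsc : ∀ (m : Nat), (if m > 0 then m * m else 0) = m * m := by
    intro m; cases m <;> simp
  simp only [hsc]
  rw [pvRelevant_eq ((PySem.Set.ofList (PySem.Str.split₀ (PySem.Str.lower question))).diff
        (PySem.Set.ofList pyStopWords))
      ((PySem.Str.split? (PySem.Str.replace content "\n" " ") ". ").getD [])]
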